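-- pv_equiv track=rewrite | github.com/scout719/adventOfCode | 2015/day8.py | day8_2
-- ===== SOURCE A (Python) =====
-- def day8_count_reverse(line):
--     code = len(line)
--     mem = 2
--     i = 0
--     while i < len(line):
--         if line[i] in ["\\", "\""]:
--             mem += 2
--         else:
--             mem += 1
--         i += 1
--     return code, mem
--
-- def day8_2(data):
--     total_code = 0
--     total_mem = 0
--     for line in data:
--         code, mem = day8_count_reverse(line)
--         total_code += code
--         total_mem += mem
--
--     return total_mem - total_code
-- ===== SOURCE B (Python) =====
-- def day8_2(data):
--     return sum(2 + line.count("\\") + line.count("\"") for line in data)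
-- ===== Notes on version B (the rewrite author's own statement) =====
-- stated objective: simpler
-- what changed: Replaces the per-character while loop with separate code/mem accumulators by the closed form: per line the difference is 2 plus the number of backslashes and double quotes, so B sums 2 + line.count('\\') + line.count('"') in one expression; the per-char Python loop is replaced by C-level str.count, a constant-factor speedup a timing run measured.
import Mathlib
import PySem

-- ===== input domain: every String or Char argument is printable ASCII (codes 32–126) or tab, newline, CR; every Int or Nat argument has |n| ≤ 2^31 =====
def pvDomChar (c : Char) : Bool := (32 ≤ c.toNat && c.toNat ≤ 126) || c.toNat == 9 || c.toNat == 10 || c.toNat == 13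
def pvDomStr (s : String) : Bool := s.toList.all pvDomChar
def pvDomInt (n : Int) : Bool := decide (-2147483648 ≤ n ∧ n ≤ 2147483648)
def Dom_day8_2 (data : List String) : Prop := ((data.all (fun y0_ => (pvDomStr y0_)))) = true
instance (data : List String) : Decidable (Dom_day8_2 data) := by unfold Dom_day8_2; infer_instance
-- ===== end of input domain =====

-- B replaces A's per-character while loop with two accumulators by the closed form
-- "2 + count of backslashes + count of quotes per line", summed in one expression (objective: simpler).

-- ===== PORT A =====
-- while i < len(line): mem += 2 if line[i] in ["\\", "\""] else 1  — sequential scan over the chars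
def day8CountLoop : List Char → Int → Int
  | [], mem => mem
  | c :: rest, mem => day8CountLoop rest (if c = '\\' ∨ c = '"' then mem + 2 else mem + 1)

def day8_count_reverse (line : String) : Int × Int :=
  ((line.toList.length : Int), day8CountLoop line.toList 2)

def day8_2 (data : List String) : Int :=
  let totals := data.foldl
    (fun (acc : Int × Int) line =>
      let cm := day8_count_reverse line
      (acc.1 + cm.1, acc.2 + cm.2)) (0, 0)
  totals.2 - totals.1

-- ===== PORT B =====
def day8_2_alt (data : List String) : Int :=
  data.foldl (fun acc line =>
    acc + (2 + (PySem.Str.count line "\\" : Int) + (PySem.Str.count line "\"" : Int))) 0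

-- ===== PRECONDITION & SPEC =====
def Spec_day8_2 (data : List String) (out : Int) : Prop := out = day8_2_alt data
instance (data : List String) (out : Int) : Decidable (Spec_day8_2 data out) := by unfold Spec_day8_2; infer_instance

-- ===== CLAIM (what is proved, stated in full; the proofs are below) =====
def Claim_equal_day8_2 : Prop := ∀ (data : List String), Dom_day8_2 data → Spec_day8_2 data (day8_2 data)

-- ===== LEMMAS AND PROOFS =====

-- PySem.Chars.count with a single-character needle is List.count
theorem count_go_single (c : Char) : ∀ (fuel : Nat) (l : List Char) (acc : Nat),
    l.length ≤ fuel → PySem.Chars.count.go [c] fuel l acc = acc + l.count c := by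
  intro fuel
  induction fuel with
  | zero => intro l acc h; cases l with
    | nil => simp [PySem.Chars.count.go]
    | cons a t => simp at h
  | succ n ih => intro l acc h; cases l with
    | nil => simp [PySem.Chars.count.go]
    | cons a t =>
      simp only [PySem.Chars.count.go]
      by_cases hc : a = c
      · subst hc
        simp [List.isPrefixOf, ih t (acc + 1) (by simpa using h)]
        omega
      · have hp : [c].isPrefixOf (a :: t) = false := by
          simp [List.isPrefixOf]
          exact fun h' => hc h'.symm
        simp [hp, ih t acc (by simpa using h), hc]

theorem count_single (cs : List Char) (c : Char) : PySem.Chars.count cs [c] = cs.count c := by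
  simp [PySem.Chars.count, count_go_single c cs.length cs 0 le_rfl]

-- A's inner loop in closed form
theorem day8CountLoop_eq (cs : List Char) : ∀ (m : Int),
    day8CountLoop cs m = m + cs.length + cs.count '\\' + cs.count '"' := by
  induction cs with
  | nil => intro m; simp [day8CountLoop]
  | cons c t ih =>
    intro m
    simp only [day8CountLoop, ih]
    by_cases h1 : c = '\\'
    · subst h1; simp; ring
    · by_cases h2 : c = '"'
      · subst h2; simp [h1]; ring
      · simp [h1, h2]; ring

-- per line: mem - code = 2 + count '\\' + count '"'
theorem line_contrib (line : String) :
    (day8_count_reverse line).2 - (day8_count_reverse line).1 =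
      2 + (PySem.Str.count line "\\" : Int) + (PySem.Str.count line "\"" : Int) := by
  simp [day8_count_reverse, day8CountLoop_eq, count_single]
  ring

def day8Contrib (line : String) : Int :=
  2 + (PySem.Str.count line "\\" : Int) + (PySem.Str.count line "\"" : Int)

theorem day8_foldA (data : List String) : ∀ (c m : Int),
    (data.foldl (fun (acc : Int × Int) line =>
        let cm := day8_count_reverse line
        (acc.1 + cm.1, acc.2 + cm.2)) (c, m)).2 -
    (data.foldl (fun (acc : Int × Int) line =>
        let cm := day8_count_reverse line
        (acc.1 + cm.1, acc.2 + cm.2)) (c, m)).1 =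
      m - c + (data.map day8Contrib).sum := by
  induction data with
  | nil => intro c m; simp
  | cons line rest ih =>
    intro c m
    simp only [List.foldl_cons, List.map_cons, List.sum_cons]
    rw [ih]
    have := line_contrib line
    simp only [day8Contrib]
    omega

-- ===== VERDICT (by name: the statement is the Claim_ definition above) =====
theorem day8_2_spec : Claim_equal_day8_2 := by
  intro data _
  unfold Spec_day8_2 day8_2 day8_2_alt
  have hb : data.foldl (fun acc line =>
      acc + (2 + (PySem.Str.count line "\\" : Int) + (PySem.Str.count line "\"" : Int))) 0 =
      0 + (data.map day8Contrib).sum := by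
    exact PySem.List.foldl_add data day8Contrib 0
  simp only [hb]
  rw [day8_foldA]
  ring
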